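-- pv_equiv track=rewrite | github.com/roman-4erkasov/made-algo | topic02_workD.py | count_subwords
-- ===== SOURCE A (Python) =====
-- from collections import deque
--
-- CHAR_BIAS = 97  # order of character 'a'
--
-- N_DIGITS = 26  # number of digits is length of english alphabet
--
-- def char2num(value):
--     return ord(value) - CHAR_BIAS
--
-- def count_subwords(main_string, card_string, n_main):
--     if main_string == card_string:
--         return n_main * (n_main + 1) // 2
--
--     result = 0
--
--     main_arr = [char2num(c) for c in main_string]
--     main_counter = [0 for _ in range(N_DIGITS + 1)]
--     for num in main_arr:
--         main_counter[num] += 1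
--
--     card_arr = [char2num(c) for c in card_string]
--     card_counter = [0 for _ in range(N_DIGITS + 1)]
--     for num in card_arr:
--         card_counter[num] += 1
--
--     # if counters are equal then computation is simple
--     counters_eq = True
--     for i in range(N_DIGITS):
--         if card_counter[i] != main_counter[i]:
--             counters_eq = False
--             break
--     if counters_eq:
--         return n_main * (n_main + 1) // 2
--
--     index_start = 0
--     index_finish = 0
--     buff = deque([main_arr[0]])
--     counts = card_counter.copy()
--     while index_start < n_main:
--         num = buff[-1]
--         if counts[num] > 0:
--             counts[num] = counts[num] - 1
--             result += index_finish - index_start + 1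
--             if index_finish < n_main - 1:
--                 index_finish += 1
--                 buff.append(main_arr[index_finish])
--             else:
--                 break
--         else:
--             num = buff.popleft()
--             if counts[num] < card_counter[num]:
--                 counts[num] = counts[num] + 1
--             if index_start < n_main - 1:
--                 index_start += 1
--                 if index_finish < index_start:
--                     index_finish = index_start
--                     buff.append(main_arr[index_finish])
--             else:
--                 break
--     return result
-- ===== SOURCE B (Python) =====
-- CHAR_BIAS = 97  # order of character 'a'
--
-- N_DIGITS = 26  # number of digits is length of english alphabet
--
-- def char2num(value):
--     return ord(value) - CHAR_BIAS
--
-- def count_subwords(main_string, card_string, n_main):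
--     if main_string == card_string:
--         return n_main * (n_main + 1) // 2
--
--     main_arr = [char2num(c) for c in main_string]
--     main_counter = [0] * (N_DIGITS + 1)
--     for num in main_arr:
--         main_counter[num] += 1
--
--     card_counter = [0] * (N_DIGITS + 1)
--     for c in card_string:
--         card_counter[char2num(c)] += 1
--
--     if main_counter[:N_DIGITS] == card_counter[:N_DIGITS]:
--         return n_main * (n_main + 1) // 2
--
--     # textbook two-pointer: for each left end l, push r as far as the
--     # window still fits inside card_counter, add r - l substrings
--     result = 0
--     window = [0] * (N_DIGITS + 1)
--     r = 0
--     for l in range(n_main):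
--         if r < l:
--             r = l
--         while r < n_main:
--             c = main_arr[r]
--             if window[c] + 1 > card_counter[c]:
--                 break
--             window[c] += 1
--             r += 1
--         result += r - l
--         if l < r:
--             window[main_arr[l]] -= 1
--     return result
-- ===== Notes on version B (the rewrite author's own statement) =====
-- stated objective: simpler
-- what changed: A's merged while-loop that advances either endpoint of a deque-backed window per iteration (with popleft/append bookkeeping and a counts-budget array) is replaced by the textbook two-pointer sliding window: a plain for-loop over the left endpoint l that pushes a monotone right index r as far as the window still fits in card_counter and adds r - l substrings; the deque and the merged-state machine disappear.
import Mathlib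
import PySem

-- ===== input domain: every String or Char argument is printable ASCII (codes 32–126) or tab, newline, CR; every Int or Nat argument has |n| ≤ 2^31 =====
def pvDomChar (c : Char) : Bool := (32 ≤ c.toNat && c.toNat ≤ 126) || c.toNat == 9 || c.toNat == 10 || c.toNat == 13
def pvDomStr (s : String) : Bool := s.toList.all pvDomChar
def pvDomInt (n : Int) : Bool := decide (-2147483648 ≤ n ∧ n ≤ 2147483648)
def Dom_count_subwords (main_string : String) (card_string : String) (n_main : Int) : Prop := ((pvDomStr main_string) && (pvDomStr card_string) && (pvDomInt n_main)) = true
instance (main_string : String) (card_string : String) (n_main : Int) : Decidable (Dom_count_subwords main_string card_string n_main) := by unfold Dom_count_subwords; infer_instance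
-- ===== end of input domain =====

-- B replaces A's merged deque/two-index while-loop by the textbook per-left-end
-- two-pointer sliding window (objective: simpler); return value only, no mutation.

-- ===== PORT A =====
def char2num (c : Char) : Int := (c.toNat : Int) - 97

-- counter[num] += 1 over a Python list (IndexError = none)
def bumpStep (acc : Option (List Int)) (num : Int) : Option (List Int) :=
  acc.bind fun cnt => (PySem.List.pyGet? cnt num).bind fun v => PySem.List.pySet? cnt num (v + 1)

def buildCounterA (nums : List Int) : Option (List Int) :=
  nums.foldl bumpStep (some (List.replicate 27 (0 : Int)))

-- the counters_eq flag loop over range(N_DIGITS) with break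
def countersEqA (card_counter main_counter : List Int) : Bool :=
  (PySem.List.pyRange 0 26 1).all fun i =>
    PySem.List.pyGetD card_counter i 0 == PySem.List.pyGetD main_counter i 0

-- A's merged while-loop; state = (index_start, index_finish, buff, counts, result)
def loopA (arr cc : List Int) (n : Int) (s f : Int) (buff counts : List Int)
    (result : Int) : Option Int :=
  if _hs : s < n then
    match PySem.List.pyGet? buff (-1) with          -- num = buff[-1]
    | none => none
    | some num =>
      match PySem.List.pyGet? counts num with
      | none => none
      | some d =>
        if 0 < d then                               -- counts[num] > 0
          if hf : f < n - 1 then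
            match PySem.List.pyGet? arr (f + 1) with
            | none => none
            | some x =>
              loopA arr cc n s (f + 1) (buff ++ [x])
                (PySem.List.pySetD counts num (d - 1)) (result + (f - s + 1))
          else some (result + (f - s + 1))
        else
          match buff with                           -- num = buff.popleft()
          | [] => none
          | num0 :: buffRest =>
            match PySem.List.pyGet? counts num0, PySem.List.pyGet? cc num0 with
            | some d0, some c0 =>
              if hs' : s < n - 1 then
                if hf' : f < s + 1 then
                  match PySem.List.pyGet? arr (s + 1) with
                  | none => none
                  | some x =>
                    loopA arr cc n (s + 1) (s + 1) (buffRest ++ [x])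
                      (if d0 < c0 then PySem.List.pySetD counts num0 (d0 + 1) else counts) result
                else loopA arr cc n (s + 1) f buffRest
                  (if d0 < c0 then PySem.List.pySetD counts num0 (d0 + 1) else counts) result
              else some result
            | _, _ => none
  else some result
  termination_by ((n - s).toNat + (n - f).toNat)
  decreasing_by all_goals omega

def count_subwords (main_string : String) (card_string : String) (n_main : Int) : Int :=
  if main_string == card_string then
    PySem.Int.floordiv (n_main * (n_main + 1)) 2
  else
    let main_arr := main_string.toList.map char2num
    match buildCounterA main_arr with
    | none => 0
    | some main_counter =>
      let card_arr := card_string.toList.map char2num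
      match buildCounterA card_arr with
      | none => 0
      | some card_counter =>
        if countersEqA card_counter main_counter then
          PySem.Int.floordiv (n_main * (n_main + 1)) 2
        else
          match PySem.List.pyGet? main_arr 0 with   -- buff = deque([main_arr[0]])
          | none => 0
          | some x0 =>
            (loopA main_arr card_counter n_main 0 0 [x0] card_counter 0).getD 0

-- ===== PORT B =====
-- counter[num] += 1, written as a match chain
def tallyB (cnt? : Option (List Int)) (num : Int) : Option (List Int) :=
  match cnt? with
  | none => none
  | some cnt =>
    match PySem.List.pyGet? cnt num with
    | none => none
    | some v => PySem.List.pySet? cnt num (v + 1)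

-- main_counter[:N_DIGITS] == card_counter[:N_DIGITS]
def sliceEqB (mc cc : List Int) : Bool :=
  PySem.List.slice mc none (some 26) == PySem.List.slice cc none (some 26)

-- inner while: push r right while the window still fits into card_counter
def extendB (arr cc : List Int) (n r : Int) (window : List Int) : Option (Int × List Int) :=
  if _hr : r < n then
    match PySem.List.pyGet? arr r with
    | none => none
    | some c =>
      match PySem.List.pyGet? window c, PySem.List.pyGet? cc c with
      | some w, some k =>
        if k < w + 1 then some (r, window)          -- window[c] + 1 > card_counter[c]: break
        else extendB arr cc n (r + 1) (PySem.List.pySetD window c (w + 1))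
      | _, _ => none
  else some (r, window)
  termination_by (n - r).toNat
  decreasing_by omega

-- outer for l in range(n_main)
def outerB (arr cc : List Int) (n : Int) (l r : Int) (window : List Int)
    (result : Int) : Option Int :=
  if _hl : l < n then
    match extendB arr cc n (if r < l then l else r) window with
    | none => none
    | some (r1, window1) =>
      if l < r1 then
        match PySem.List.pyGet? arr l with
        | none => none
        | some cl =>
          match PySem.List.pyGet? window1 cl with
          | none => none
          | some w =>
            outerB arr cc n (l + 1) r1 (PySem.List.pySetD window1 cl (w - 1))
              (result + (r1 - l))
      else outerB arr cc n (l + 1) r1 window1 (result + (r1 - l))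
  else some result
  termination_by (n - l).toNat
  decreasing_by all_goals omega

def count_subwords_alt (main_string : String) (card_string : String) (n_main : Int) : Int :=
  if main_string == card_string then
    PySem.Int.floordiv (n_main * (n_main + 1)) 2
  else
    let main_arr := main_string.toList.map char2num
    match main_arr.foldl tallyB (some (List.replicate 27 (0 : Int))) with
    | none => 0
    | some main_counter =>
      match card_string.toList.foldl (fun acc c => tallyB acc (char2num c))
          (some (List.replicate 27 (0 : Int))) with
      | none => 0
      | some card_counter =>
        if sliceEqB main_counter card_counter then
          PySem.Int.floordiv (n_main * (n_main + 1)) 2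
        else
          (outerB main_arr card_counter n_main 0 0 (List.replicate 27 (0 : Int)) 0).getD 0

-- ===== PRECONDITION & SPEC =====
-- slot index a Python access counter[ord(c)-97] really hits (negative indices wrap):
def slotOfInt (x : Int) : Nat := (x.emod 27).toNat
def cntSlot (xs : List Int) (k : Nat) : Nat := xs.countP (fun x => slotOfInt x = k)

-- Pre_ = exactly the inputs where A returns: either the two strings are equal, or all
-- chars index the 27-slot counters without IndexError (ord in [70,123]) and either the
-- 26 compared slot counts agree (triangular shortcut) or main is nonempty with
-- n_main ≤ len(main_string) so every main_arr access is in range.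
def Pre_count_subwords (main_string : String) (card_string : String) (n_main : Int) : Prop :=
  main_string = card_string ∨
    ((∀ ch ∈ main_string.toList, 70 ≤ ch.toNat ∧ ch.toNat ≤ 123) ∧
     (∀ ch ∈ card_string.toList, 70 ≤ ch.toNat ∧ ch.toNat ≤ 123) ∧
     ((∀ i < 26, cntSlot (main_string.toList.map char2num) i
          = cntSlot (card_string.toList.map char2num) i) ∨
      (main_string ≠ "" ∧ n_main ≤ (main_string.toList.length : Int))))
instance (main_string : String) (card_string : String) (n_main : Int) :
    Decidable (Pre_count_subwords main_string card_string n_main) := by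
  unfold Pre_count_subwords; infer_instance

def pvWitness_count_subwords : String × String × Int := ("ab", "ab", 2)

def Spec_count_subwords (main_string : String) (card_string : String) (n_main : Int) (out : Int) : Prop := out = count_subwords_alt main_string card_string n_main
instance (main_string : String) (card_string : String) (n_main : Int) (out : Int) : Decidable (Spec_count_subwords main_string card_string n_main out) := by unfold Spec_count_subwords; infer_instance

-- ===== CLAIM (what is proved, stated in full; the proofs are below) =====
def Claim_equal_count_subwords : Prop := ∀ (main_string : String) (card_string : String) (n_main : Int), Dom_count_subwords main_string card_string n_main → Pre_count_subwords main_string card_string n_main → Spec_count_subwords main_string card_string n_main (count_subwords main_string card_string n_main)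

-- ===== LEMMAS AND PROOFS =====

-- table of 27 counter slots, as a function graph
def tbl (g : Nat → Int) : List Int := (List.range 27).map g
-- the window main_arr[l:r]
def wnd (arr : List Int) (l r : Nat) : List Int := (arr.take r).drop l
-- the window's char counts fit inside the card's
def fits (arr card : List Int) (l r : Nat) : Prop :=
  ∀ k, cntSlot (wnd arr l r) k ≤ cntSlot card k
def fitsB (arr card : List Int) (l r : Nat) : Bool :=
  (List.range 27).all fun k => decide (cntSlot (wnd arr l r) k ≤ cntSlot card k)
-- number of valid left ends for right end y (substrings = pairs l < y ≤ N with fits)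
def cntEndF (arr card : List Int) (N y : Nat) : Nat :=
  ((Finset.range (N+1)).filter fun x => x < y ∧ fitsB arr card x y = true).card
-- number of valid right ends for left end x
def cntStartF (arr card : List Int) (N x : Nat) : Nat :=
  ((Finset.range (N+1)).filter fun y => x < y ∧ fitsB arr card x y = true).card
-- total number of fitting substrings of arr[0:N]
def totalF (arr card : List Int) (N : Nat) : Nat :=
  ∑ y ∈ Finset.range (N+1), cntEndF arr card N y

lemma slot_lt (x : Int) : slotOfInt x < 27 := by
  have e : x.emod 27 = x % 27 := rfl
  unfold slotOfInt; omega

lemma cntSlot_zero_of_ge (xs : List Int) (k : Nat) (h : 27 ≤ k) : cntSlot xs k = 0 := by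
  unfold cntSlot
  rw [List.countP_eq_zero]
  intro x _
  simpa using Nat.ne_of_lt (Nat.lt_of_lt_of_le (slot_lt x) h)

lemma fitsB_iff (arr card : List Int) (l r : Nat) :
    fitsB arr card l r = true ↔ fits arr card l r := by
  unfold fitsB fits
  rw [List.all_eq_true]
  constructor
  · intro h k
    by_cases hk : k < 27
    · simpa using h k (List.mem_range.mpr hk)
    · rw [cntSlot_zero_of_ge _ k (by omega)]; exact Nat.zero_le _
  · intro h k _
    simpa using h k

lemma cntSlot_append (xs : List Int) (x : Int) (k : Nat) :
    cntSlot (xs ++ [x]) k = cntSlot xs k + (if slotOfInt x = k then 1 else 0) := by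
  unfold cntSlot
  rw [List.countP_append]
  simp [List.countP_cons]

lemma cntSlot_cons (x : Int) (xs : List Int) (k : Nat) :
    cntSlot (x :: xs) k = (if slotOfInt x = k then 1 else 0) + cntSlot xs k := by
  unfold cntSlot
  rw [List.countP_cons]
  simp [Nat.add_comm]

lemma wnd_nil (arr : List Int) (l r : Nat) (h : r ≤ l) : wnd arr l r = [] := by
  unfold wnd
  exact List.drop_eq_nil_of_le (le_trans (List.length_take_le _ _) h)

lemma wnd_succ (arr : List Int) (l r : Nat) (h1 : l ≤ r) (h2 : r < arr.length) :
    wnd arr l (r+1) = wnd arr l r ++ [arr[r]] := by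
  unfold wnd
  rw [List.take_succ_eq_append_getElem h2, List.drop_append_of_le_length (by simp; omega)]

lemma wnd_cons (arr : List Int) (l r : Nat) (h1 : l < r) (h2 : r ≤ arr.length) :
    wnd arr l r = arr[l]'(by omega) :: wnd arr (l+1) r := by
  unfold wnd
  rw [List.drop_eq_getElem_cons (by simpa using by omega : l < (arr.take r).length)]
  congr 1
  exact List.getElem_take

lemma fits_nil (arr card : List Int) (l r : Nat) (h : r ≤ l) : fits arr card l r := by
  intro k
  rw [wnd_nil arr l r h]
  exact Nat.zero_le _

lemma wnd_sublist (arr : List Int) (l r l' r' : Nat) (hl : l ≤ l') (hr : r' ≤ r) :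
    (wnd arr l' r').Sublist (wnd arr l r) := by
  by_cases h : r' ≤ l'
  · rw [wnd_nil arr l' r' h]; exact List.nil_sublist _
  · have e : wnd arr l' r' = ((wnd arr l r).take (r' - l)).drop (l' - l) := by
      unfold wnd
      rw [List.take_drop, List.take_take, List.drop_drop]
      congr 2 <;> omega
    rw [e]
    exact ((List.take_sublist _ _).drop _).trans (List.drop_sublist _ _)

lemma fits_mono (arr card : List Int) (l r l' r' : Nat) (hl : l ≤ l') (hr : r' ≤ r)
    (h : fits arr card l r) : fits arr card l' r' := by
  intro k
  exact le_trans (List.Sublist.countP_le (wnd_sublist arr l r l' r' hl hr)) (h k)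

-- ---- 27-slot table access ----
lemma pyIdx27 (x : Int) (h1 : -27 ≤ x) (h2 : x ≤ 26) :
    PySem.List.pyIdx? 27 x = some (slotOfInt x) := by
  have e : x.emod 27 = x % 27 := rfl
  unfold slotOfInt
  simp only [PySem.List.pyIdx?]
  split_ifs <;> [skip; omega; skip; omega] <;> · congr 1; omega

lemma tbl_length (g : Nat → Int) : (tbl g).length = 27 := by simp [tbl]

lemma tbl_get (g : Nat → Int) (k : Nat) (h : k < 27) : (tbl g)[k]'(by simp [tbl]; omega) = g k := by
  simp [tbl]

lemma tbl_pyGet (g : Nat → Int) (x : Int) (h1 : -27 ≤ x) (h2 : x ≤ 26) :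
    PySem.List.pyGet? (tbl g) x = some (g (slotOfInt x)) := by
  simp only [PySem.List.pyGet?, tbl_length, pyIdx27 x h1 h2, Option.bind_some]
  rw [List.getElem?_eq_getElem (by rw [tbl_length]; exact slot_lt x)]
  rw [tbl_get g _ (slot_lt x)]

lemma tbl_pySet (g : Nat → Int) (x : Int) (v : Int) (h1 : -27 ≤ x) (h2 : x ≤ 26) :
    PySem.List.pySet? (tbl g) x v
      = some (tbl fun k => if k = slotOfInt x then v else g k) := by
  simp only [PySem.List.pySet?, tbl_length, pyIdx27 x h1 h2, Option.map_some]
  congr 1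
  apply List.ext_getElem
  · simp [tbl]
  · intro k hk _
    rw [List.getElem_set]
    have hk27 : k < 27 := by simpa [tbl] using hk
    simp only [tbl, List.getElem_map, List.getElem_range]
    by_cases hks : k = slotOfInt x
    · simp [hks]
    · have hne : slotOfInt x ≠ k := fun h => hks h.symm
      simp [hne, hks]

lemma tbl_pySetD (g : Nat → Int) (x : Int) (v : Int) (h1 : -27 ≤ x) (h2 : x ≤ 26) :
    PySem.List.pySetD (tbl g) x v = tbl fun k => if k = slotOfInt x then v else g k := by
  rw [PySem.List.pySetD, tbl_pySet g x v h1 h2]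
  rfl

lemma tbl_congr (g h : Nat → Int) (H : ∀ k < 27, g k = h k) : tbl g = tbl h := by
  unfold tbl
  apply List.map_congr_left
  intro k hk
  exact H k (List.mem_range.mp hk)

lemma replicate_tbl : List.replicate 27 (0:Int) = tbl fun _ => 0 := by
  apply List.ext_getElem <;> simp [tbl]

lemma tbl_getD (g : Nat → Int) (k : Nat) (h : k < 27) : (tbl g).getD k 0 = g k := by
  simp [tbl, List.getD, List.getElem?_map, List.getElem?_range h]

-- ---- counter building ----
lemma foldl_bump (nums : List Int) (g : Nat → Int) (h : ∀ x ∈ nums, -27 ≤ x ∧ x ≤ 26) :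
    nums.foldl bumpStep (some (tbl g)) = some (tbl fun k => g k + (cntSlot nums k : Int)) := by
  induction nums generalizing g with
  | nil => simp [cntSlot]
  | cons x rest ih =>
    have hx := h x (by simp)
    rw [List.foldl_cons]
    have hb : bumpStep (some (tbl g)) x
        = some (tbl fun k => if k = slotOfInt x then g (slotOfInt x) + 1 else g k) := by
      simp only [bumpStep, Option.bind_some, tbl_pyGet g x hx.1 hx.2, Option.bind_some]
      exact tbl_pySet g x _ hx.1 hx.2
    rw [hb, ih _ (fun y hy => h y (by simp [hy]))]
    congr 1
    apply tbl_congr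
    intro k hk
    rw [cntSlot_cons]
    by_cases hks : k = slotOfInt x
    · subst hks
      simp only [if_true]
      push_cast
      ring
    · have hne : ¬ slotOfInt x = k := fun hh => hks hh.symm
      simp only [if_neg hks, if_neg hne]
      push_cast
      ring

lemma rawBuild_eq (nums : List Int) (h : ∀ x ∈ nums, -27 ≤ x ∧ x ≤ 26) :
    nums.foldl bumpStep (some (List.replicate 27 (0:Int)))
      = some (tbl fun k => (cntSlot nums k : Int)) := by
  rw [replicate_tbl, foldl_bump nums _ h]
  congr 1
  exact tbl_congr _ _ (fun k _ => by omega)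

lemma buildCounterA_eq (nums : List Int) (h : ∀ x ∈ nums, -27 ≤ x ∧ x ≤ 26) :
    buildCounterA nums = some (tbl fun k => (cntSlot nums k : Int)) := by
  unfold buildCounterA
  exact rawBuild_eq nums h

lemma tallyB_eq : tallyB = bumpStep := by
  funext acc num
  cases acc with
  | none => rfl
  | some cnt =>
    simp only [tallyB, bumpStep, Option.bind_some]
    cases PySem.List.pyGet? cnt num <;> rfl

-- ---- the two shortcut tests agree ----
lemma countersEqA_iff (marr carr : List Int) :
    countersEqA (tbl fun k => (cntSlot carr k : Int)) (tbl fun k => (cntSlot marr k : Int)) = true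
      ↔ ∀ i < 26, cntSlot marr i = cntSlot carr i := by
  unfold countersEqA
  rw [List.all_eq_true]
  constructor
  · intro h i hi
    have h2 := h (i : Int) (by rw [PySem.List.mem_pyRange_one]; omega)
    rw [PySem.List.pyGetD_natCast, PySem.List.pyGetD_natCast,
      tbl_getD _ i (by omega), tbl_getD _ i (by omega), beq_iff_eq] at h2
    omega
  · intro h i hi
    rw [PySem.List.mem_pyRange_one] at hi
    have h0 : i = ((i.toNat : Nat) : Int) := by omega
    rw [h0, PySem.List.pyGetD_natCast, PySem.List.pyGetD_natCast,
      tbl_getD _ i.toNat (by omega), tbl_getD _ i.toNat (by omega), beq_iff_eq,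
      h i.toNat (by omega)]

lemma slice26_tbl (g : Nat → Int) :
    PySem.List.slice (tbl g) none (some 26) = (List.range 26).map g := by
  rw [PySem.List.slice_to (tbl g) (show (0:Int) ≤ 26 by norm_num)]
  unfold tbl
  rw [← List.map_take, List.take_range]
  rfl

lemma sliceEqB_iff (marr carr : List Int) :
    sliceEqB (tbl fun k => (cntSlot marr k : Int)) (tbl fun k => (cntSlot carr k : Int)) = true
      ↔ ∀ i < 26, cntSlot marr i = cntSlot carr i := by
  unfold sliceEqB
  rw [slice26_tbl, slice26_tbl, beq_iff_eq]
  constructor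
  · intro h i hi
    have := congrArg (fun l => l[i]?) h
    simp only [List.getElem?_map, List.getElem?_range hi] at this
    simp only [Option.map_some, Option.some.injEq] at this
    omega
  · intro h
    apply List.map_congr_left
    intro i hi
    rw [h i (List.mem_range.mp hi)]

-- ---- counting ----
lemma cntEnd_eq (arr card : List Int) (N S F : Nat) (hSF : S ≤ F) (hF : F < N)
    (hfit : fits arr card S (F+1)) (hnot : ∀ x < S, ¬ fits arr card x (F+1)) :
    cntEndF arr card N (F+1) = F + 1 - S := by
  unfold cntEndF
  have : (Finset.range (N+1)).filter (fun x => x < F+1 ∧ fitsB arr card x (F+1) = true)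
      = Finset.Icc S F := by
    apply Finset.ext
    intro x
    simp only [Finset.mem_filter, Finset.mem_range, Finset.mem_Icc, fitsB_iff]
    constructor
    · rintro ⟨_, hlt, hf⟩
      refine ⟨?_, by omega⟩
      by_contra hx
      exact hnot x (by omega) hf
    · rintro ⟨h1, h2⟩
      exact ⟨by omega, by omega, fits_mono arr card S (F+1) x (F+1) h1 le_rfl hfit⟩
  rw [this, Nat.card_Icc]

lemma cntEnd_zero (arr card : List Int) (N y : Nat) (hnot : ∀ x < y, ¬ fits arr card x y) :
    cntEndF arr card N y = 0 := by
  unfold cntEndF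
  rw [Finset.card_eq_zero, Finset.filter_eq_empty_iff]
  intro x _
  rw [fitsB_iff]
  rintro ⟨h1, h2⟩
  exact hnot x h1 h2

lemma cntStart_eq (arr card : List Int) (N L R : Nat) (hLR : L ≤ R) (hRN : R ≤ N)
    (hfit : fits arr card L R) (hmax : R = N ∨ ¬ fits arr card L (R+1)) :
    cntStartF arr card N L = R - L := by
  unfold cntStartF
  have : (Finset.range (N+1)).filter (fun y => L < y ∧ fitsB arr card L y = true)
      = Finset.Ioc L R := by
    apply Finset.ext
    intro y
    simp only [Finset.mem_filter, Finset.mem_range, Finset.mem_Ioc, fitsB_iff]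
    constructor
    · rintro ⟨hy, hlt, hf⟩
      refine ⟨hlt, ?_⟩
      by_contra hgt
      rcases hmax with h | h
      · omega
      · exact h (fits_mono arr card L y L (R+1) le_rfl (by omega) hf)
    · rintro ⟨h1, h2⟩
      exact ⟨by omega, h1, fits_mono arr card L R L y le_rfl h2 hfit⟩
  rw [this, Nat.card_Ioc]

lemma cntStart_last (arr card : List Int) (N : Nat) : cntStartF arr card N N = 0 := by
  unfold cntStartF
  rw [Finset.card_eq_zero, Finset.filter_eq_empty_iff]
  intro y hy
  rw [Finset.mem_range] at hy
  rintro ⟨h1, _⟩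
  omega

lemma totalF_eq_sumStart (arr card : List Int) (N : Nat) :
    totalF arr card N = ∑ x ∈ Finset.range N, cntStartF arr card N x := by
  unfold totalF cntEndF
  have h1 : ∀ y, ((Finset.range (N+1)).filter
      (fun x => x < y ∧ fitsB arr card x y = true)).card
      = ∑ x ∈ Finset.range (N+1), if x < y ∧ fitsB arr card x y = true then 1 else 0 := by
    intro y
    rw [Finset.card_filter]
  simp only [h1]
  rw [Finset.sum_comm]
  have h2 : ∀ x, (∑ y ∈ Finset.range (N+1), if x < y ∧ fitsB arr card x y = true then 1 else 0)
      = cntStartF arr card N x := by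
    intro x
    rw [cntStartF, Finset.card_filter]
  simp only [h2]
  rw [Finset.sum_range_succ, cntStart_last, Nat.add_zero]

-- ---- the B loops ----
lemma extendB_spec (arr card : List Int) (n : Int) (N : Nat) (hn : n = (N:Int))
    (hN : N ≤ arr.length) (hb : ∀ x ∈ arr, -27 ≤ x ∧ x ≤ 26) :
    ∀ fuel (L R : Nat), N - R < fuel → L ≤ R → R ≤ N → fits arr card L R →
    ∃ R1 : Nat, R ≤ R1 ∧ R1 ≤ N ∧ fits arr card L R1 ∧
      (R1 = N ∨ ¬ fits arr card L (R1+1)) ∧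
      extendB arr (tbl fun k => (cntSlot card k : Int)) n (R:Int)
        (tbl fun k => (cntSlot (wnd arr L R) k : Int))
      = some ((R1:Int), tbl fun k => (cntSlot (wnd arr L R1) k : Int)) := by
  intro fuel
  induction fuel with
  | zero => intro L R hfuel; exact absurd hfuel (by omega)
  | succ fuel ih =>
    intro L R hfuel hLR hRN hfit
    by_cases hRN' : R < N
    · have hRlen : R < arr.length := by omega
      have hx := hb arr[R] (List.getElem_mem hRlen)
      have hstep : wnd arr L (R+1) = wnd arr L R ++ [arr[R]] := wnd_succ arr L R hLR hRlen
      by_cases hcase : (cntSlot card (slotOfInt arr[R]) : Int)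
          < (cntSlot (wnd arr L R) (slotOfInt arr[R]) : Int) + 1
      · -- break: window[c] + 1 > card_counter[c]
        refine ⟨R, le_rfl, hRN, hfit, Or.inr ?_, ?_⟩
        · intro hf
          have h2 := hf (slotOfInt arr[R])
          rw [hstep, cntSlot_append, if_pos rfl] at h2
          omega
        · rw [extendB, dif_pos (by omega : (R:Int) < n)]
          simp only [PySem.List.pyGet?_natCast, List.getElem?_eq_getElem hRlen,
            tbl_pyGet _ _ hx.1 hx.2]
          rw [if_pos hcase]
      · -- extend the window
        have hfit' : fits arr card L (R+1) := by
          intro k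
          rw [hstep, cntSlot_append]
          by_cases hks : slotOfInt arr[R] = k
          · rw [if_pos hks, ← hks]
            have := hfit (slotOfInt arr[R])
            omega
          · rw [if_neg hks]
            simpa using hfit k
        have hwin : (tbl fun k => if k = slotOfInt arr[R]
              then (cntSlot (wnd arr L R) (slotOfInt arr[R]) : Int) + 1
              else (cntSlot (wnd arr L R) k : Int))
            = tbl (fun k => (cntSlot (wnd arr L (R+1)) k : Int)) := by
          apply tbl_congr
          intro k hk
          rw [hstep, cntSlot_append]
          by_cases hks : k = slotOfInt arr[R]
          · rw [if_pos hks, hks, if_pos rfl]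
            push_cast; ring
          · rw [if_neg hks, if_neg (fun hh => hks hh.symm)]
            push_cast; ring
        obtain ⟨R1, h1, h2, h3, h4, h5⟩ := ih L (R+1) (by omega) (by omega) (by omega) hfit'
        refine ⟨R1, by omega, h2, h3, h4, ?_⟩
        rw [extendB, dif_pos (by omega : (R:Int) < n)]
        simp only [PySem.List.pyGet?_natCast, List.getElem?_eq_getElem hRlen,
          tbl_pyGet _ _ hx.1 hx.2]
        rw [if_neg hcase, tbl_pySetD _ _ _ hx.1 hx.2, hwin,
          (by push_cast; ring : ((R:Int) + 1) = ((R+1 : Nat) : Int)), h5]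
    · have hRN2 : R = N := by omega
      refine ⟨R, le_rfl, hRN, hfit, Or.inl hRN2, ?_⟩
      rw [extendB, dif_neg (by omega : ¬ ((R:Int) < n))]

lemma outerB_go (arr card : List Int) (n : Int) (N : Nat) (hn : n = (N:Int))
    (hN : N ≤ arr.length) (hb : ∀ x ∈ arr, -27 ≤ x ∧ x ≤ 26) :
    ∀ fuel (L R : Nat) (result : Int), N - L < fuel → L ≤ N → R ≤ N →
      fits arr card L R →
      result = ((∑ x ∈ Finset.range L, cntStartF arr card N x : Nat) : Int) →
      outerB arr (tbl fun k => (cntSlot card k : Int)) n (L:Int) (R:Int)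
        (tbl fun k => (cntSlot (wnd arr L R) k : Int)) result
      = some ((totalF arr card N : Nat) : Int) := by
  intro fuel
  induction fuel with
  | zero => intro L R result hfuel; exact absurd hfuel (by omega)
  | succ fuel ih =>
    intro L R result hfuel hLN hRN hfit hres
    by_cases hLN' : L < N
    · have hwnd0 : wnd arr L R = wnd arr L (max L R) := by
        by_cases h : L ≤ R
        · rw [Nat.max_eq_right h]
        · rw [wnd_nil _ _ _ (by omega), wnd_nil _ _ _ (by omega)]
      have hfit0 : fits arr card L (max L R) := by
        by_cases h : L ≤ R
        · rwa [Nat.max_eq_right h]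
        · exact fits_nil _ _ _ _ (by omega)
      have hifeq : (if (R:Int) < (L:Int) then (L:Int) else (R:Int)) = ((max L R : Nat) : Int) := by
        split_ifs with h <;> [skip; push_cast] <;> omega
      obtain ⟨R1, hR1a, hR1b, hfit1, hmax1, hext⟩ :=
        extendB_spec arr card n N hn hN hb (N - max L R + 1) L (max L R)
          (by omega) (Nat.le_max_left _ _) (by omega) hfit0
      have hLR1 : L ≤ R1 := le_trans (Nat.le_max_left _ _) hR1a
      have hcnt : cntStartF arr card N L = R1 - L :=
        cntStart_eq arr card N L R1 hLR1 hR1b hfit1 hmax1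
      have hres1 : result + ((R1:Int) - (L:Int))
          = ((∑ x ∈ Finset.range (L+1), cntStartF arr card N x : Nat) : Int) := by
        rw [Finset.sum_range_succ, hcnt, hres]
        push_cast [hcnt]
        omega
      rw [outerB, dif_pos (by omega : (L:Int) < n), hifeq, hwnd0]
      simp only [hext]
      by_cases hpop : L < R1
      · rw [if_pos (by exact_mod_cast hpop : (L:Int) < (R1:Int))]
        have hLlen : L < arr.length := by omega
        have hx := hb arr[L] (List.getElem_mem hLlen)
        have hcons : wnd arr L R1 = arr[L] :: wnd arr (L+1) R1 :=
          wnd_cons arr L R1 hpop (by omega)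
        have hwin : (tbl fun k => if k = slotOfInt arr[L]
              then (cntSlot (wnd arr L R1) (slotOfInt arr[L]) : Int) - 1
              else (cntSlot (wnd arr L R1) k : Int))
            = tbl (fun k => (cntSlot (wnd arr (L+1) R1) k : Int)) := by
          apply tbl_congr
          intro k hk
          by_cases hks : k = slotOfInt arr[L]
          · rw [if_pos hks, hks]
            have h2 : cntSlot (wnd arr L R1) (slotOfInt arr[L])
                = 1 + cntSlot (wnd arr (L+1) R1) (slotOfInt arr[L]) := by
              rw [hcons, cntSlot_cons, if_pos rfl]
            rw [h2]
            push_cast; ring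
          · rw [if_neg hks]
            have h2 : cntSlot (wnd arr L R1) k = cntSlot (wnd arr (L+1) R1) k := by
              rw [hcons, cntSlot_cons, if_neg (fun hh => hks hh.symm), Nat.zero_add]
            rw [h2]
        simp only [PySem.List.pyGet?_natCast, List.getElem?_eq_getElem hLlen,
          tbl_pyGet _ _ hx.1 hx.2]
        rw [tbl_pySetD _ _ _ hx.1 hx.2, hwin,
          (by push_cast; ring : ((L:Int) + 1) = ((L+1 : Nat) : Int))]
        exact ih (L+1) R1 _ (by omega) (by omega) hR1b
          (fits_mono arr card L R1 (L+1) R1 (by omega) le_rfl hfit1) hres1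
      · rw [if_neg (by omega : ¬ ((L:Int) < (R1:Int)))]
        have heqw : (tbl fun k => (cntSlot (wnd arr L R1) k : Int))
            = tbl (fun k => (cntSlot (wnd arr (L+1) R1) k : Int)) := by
          rw [wnd_nil _ _ _ (by omega), wnd_nil _ _ _ (by omega)]
        rw [heqw, (by push_cast; ring : ((L:Int) + 1) = ((L+1 : Nat) : Int))]
        exact ih (L+1) R1 _ (by omega) (by omega) hR1b
          (fits_mono arr card L R1 (L+1) R1 (by omega) le_rfl hfit1) hres1
    · have hLN2 : L = N := by omega
      rw [outerB, dif_neg (by omega : ¬ ((L:Int) < n)), hres, hLN2,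
        totalF_eq_sumStart]

lemma cntSlot_nil (k : Nat) : cntSlot [] k = 0 := rfl

-- ---- the A loop ----
lemma loopA_go (arr card : List Int) (n : Int) (N : Nat) (hn : n = (N:Int))
    (hN : N ≤ arr.length) (hb : ∀ x ∈ arr, -27 ≤ x ∧ x ≤ 26) :
    ∀ fuel (S F : Nat) (result : Int), (N - S) + (N - F) < fuel → S ≤ F → F < N →
      fits arr card S F → (∀ x < S, ¬ fits arr card x (F+1)) →
      result = ((∑ y ∈ Finset.range (F+1), cntEndF arr card N y : Nat) : Int) →
      loopA arr (tbl fun k => (cntSlot card k : Int)) n (S:Int) (F:Int)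
        (wnd arr S (F+1))
        (tbl fun k => (cntSlot card k : Int) - (cntSlot (wnd arr S F) k : Int)) result
      = some ((totalF arr card N : Nat) : Int) := by
  intro fuel
  induction fuel with
  | zero => intro S F result hfuel; exact absurd hfuel (by omega)
  | succ fuel ih =>
    intro S F result hfuel hSF hFN hfit hnot hres
    have hFlen : F < arr.length := by omega
    have hxF := hb arr[F] (List.getElem_mem hFlen)
    have hstep : wnd arr S (F+1) = wnd arr S F ++ [arr[F]] := wnd_succ arr S F hSF hFlen
    have hlast : PySem.List.pyGet? (wnd arr S (F+1)) (-1) = some arr[F] := by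
      rw [hstep]; exact PySem.List.pyGet?_neg_one_append_singleton _ _
    rw [loopA.eq_def, dif_pos (by omega : (S:Int) < n), hlast]
    simp only [tbl_pyGet _ _ hxF.1 hxF.2]
    by_cases habs : 0 < (cntSlot card (slotOfInt arr[F]) : Int)
        - (cntSlot (wnd arr S F) (slotOfInt arr[F]) : Int)
    · -- absorb arr[F]
      rw [if_pos habs]
      have hfitF1 : fits arr card S (F+1) := by
        intro k
        rw [hstep, cntSlot_append]
        by_cases hks : slotOfInt arr[F] = k
        · rw [if_pos hks, ← hks]
          have := hfit (slotOfInt arr[F])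
          omega
        · rw [if_neg hks]
          simpa using hfit k
      have hcntE : cntEndF arr card N (F+1) = F + 1 - S :=
        cntEnd_eq arr card N S F hSF hFN hfitF1 hnot
      have hres' : result + ((F:Int) - (S:Int) + 1)
          = ((∑ y ∈ Finset.range (F+1+1), cntEndF arr card N y : Nat) : Int) := by
        rw [hres]
        push_cast [Finset.sum_range_succ, hcntE]
        omega
      have hcounts' :
          PySem.List.pySetD
              (tbl fun k => (cntSlot card k : Int) - (cntSlot (wnd arr S F) k : Int)) arr[F]
              ((cntSlot card (slotOfInt arr[F]) : Int)
                - (cntSlot (wnd arr S F) (slotOfInt arr[F]) : Int) - 1)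
            = tbl fun k => (cntSlot card k : Int) - (cntSlot (wnd arr S (F+1)) k : Int) := by
        rw [tbl_pySetD _ _ _ hxF.1 hxF.2]
        apply tbl_congr
        intro k hk
        rw [hstep, cntSlot_append]
        by_cases hks : k = slotOfInt arr[F]
        · rw [if_pos hks, hks, if_pos rfl]
          push_cast; ring
        · rw [if_neg hks, if_neg (fun hh => hks hh.symm)]
          push_cast; ring
      by_cases hnl : (F:Int) < n - 1
      · rw [dif_pos hnl]
        have hF1len : F + 1 < arr.length := by omega
        rw [(by push_cast; ring : ((F:Int) + 1) = ((F+1 : Nat) : Int))]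
        simp only [PySem.List.pyGet?_natCast, List.getElem?_eq_getElem hF1len]
        rw [hcounts', ← wnd_succ arr S (F+1) (by omega) hF1len]
        exact ih S (F+1) (result + ((F:Int) - (S:Int) + 1)) (by omega) (by omega) (by omega)
          hfitF1
          (fun x hx hf => hnot x hx (fits_mono arr card x (F+2) x (F+1) le_rfl (by omega) hf))
          hres'
      · rw [dif_neg hnl]
        rw [hres']
        unfold totalF
        rw [(by omega : N + 1 = F + 1 + 1)]
    · -- pop arr[S]
      rw [if_neg habs]
      have hSlen : S < arr.length := by omega
      have hxS := hb arr[S] (List.getElem_mem hSlen)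
      have hnotF1 : ¬ fits arr card S (F+1) := by
        intro hf
        have h2 := hf (slotOfInt arr[F])
        rw [hstep, cntSlot_append, if_pos rfl] at h2
        omega
      have hnot' : ∀ x < S + 1, ¬ fits arr card x (F+1) := by
        intro x hx
        by_cases hxS' : x < S
        · exact hnot x hxS'
        · have : x = S := by omega
          rw [this]; exact hnotF1
      have hcons : wnd arr S (F+1) = arr[S] :: wnd arr (S+1) (F+1) :=
        wnd_cons arr S (F+1) (by omega) (by omega)
      rw [hcons]
      simp only [tbl_pyGet _ _ hxS.1 hxS.2]
      have hcounts'' :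
          (if (cntSlot card (slotOfInt arr[S]) : Int)
                - (cntSlot (wnd arr S F) (slotOfInt arr[S]) : Int)
                < (cntSlot card (slotOfInt arr[S]) : Int)
           then PySem.List.pySetD
                  (tbl fun k => (cntSlot card k : Int) - (cntSlot (wnd arr S F) k : Int)) arr[S]
                  ((cntSlot card (slotOfInt arr[S]) : Int)
                    - (cntSlot (wnd arr S F) (slotOfInt arr[S]) : Int) + 1)
           else tbl fun k => (cntSlot card k : Int) - (cntSlot (wnd arr S F) k : Int))
          = tbl fun k => (cntSlot card k : Int) - (cntSlot (wnd arr (S+1) F) k : Int) := by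
        by_cases hSFlt : S < F
        · have hconsF : wnd arr S F = arr[S] :: wnd arr (S+1) F :=
            wnd_cons arr S F hSFlt (by omega)
          have hpos : 0 < cntSlot (wnd arr S F) (slotOfInt arr[S]) := by
            rw [hconsF, cntSlot_cons, if_pos rfl]; omega
          rw [if_pos (by omega), tbl_pySetD _ _ _ hxS.1 hxS.2]
          apply tbl_congr
          intro k hk
          by_cases hks : k = slotOfInt arr[S]
          · rw [if_pos hks, hks]
            have h2 : cntSlot (wnd arr S F) (slotOfInt arr[S])
                = 1 + cntSlot (wnd arr (S+1) F) (slotOfInt arr[S]) := by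
              rw [hconsF, cntSlot_cons, if_pos rfl]
            rw [h2]; push_cast; ring
          · rw [if_neg hks]
            have h2 : cntSlot (wnd arr S F) k = cntSlot (wnd arr (S+1) F) k := by
              rw [hconsF, cntSlot_cons, if_neg (fun hh => hks hh.symm), Nat.zero_add]
            rw [h2]
        · have hz : ∀ k, cntSlot (wnd arr S F) k = 0 := by
            intro k; rw [wnd_nil arr S F (by omega), cntSlot_nil]
          rw [if_neg (by have := hz (slotOfInt arr[S]); omega)]
          apply tbl_congr
          intro k hk
          rw [hz k, wnd_nil arr (S+1) F (by omega), cntSlot_nil]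
      by_cases hs' : (S:Int) < n - 1
      · rw [dif_pos hs']
        by_cases hf' : (F:Int) < (S:Int) + 1
        · have hFS : F = S := by omega
          subst hFS
          rw [dif_pos hf']
          have hS1len : F + 1 < arr.length := by omega
          rw [(by push_cast; ring : ((F:Int) + 1) = ((F+1 : Nat) : Int))]
          simp only [PySem.List.pyGet?_natCast, List.getElem?_eq_getElem hS1len]
          rw [hcounts'', ← wnd_succ arr (F+1) (F+1) le_rfl hS1len]
          have hresP : result
              = ((∑ y ∈ Finset.range (F+1+1), cntEndF arr card N y : Nat) : Int) := by
            rw [Finset.sum_range_succ, cntEnd_zero arr card N (F+1) hnot', Nat.add_zero, hres]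
          have hwz : (tbl fun k => (cntSlot card k : Int) - (cntSlot (wnd arr (F+1) F) k : Int))
              = tbl fun k => (cntSlot card k : Int) - (cntSlot (wnd arr (F+1) (F+1)) k : Int) := by
            rw [wnd_nil arr (F+1) F (by omega), wnd_nil arr (F+1) (F+1) le_rfl]
          rw [hwz]
          exact ih (F+1) (F+1) result (by omega) le_rfl (by omega)
            (fits_nil arr card (F+1) (F+1) le_rfl)
            (fun x hx hf => hnot' x hx
              (fits_mono arr card x (F+2) x (F+1) le_rfl (by omega) hf))
            hresP
        · rw [dif_neg hf']
          rw [hcounts'', (by push_cast; ring : ((S:Int) + 1) = ((S+1 : Nat) : Int))]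
          exact ih (S+1) F result (by omega) (by omega) hFN
            (fits_mono arr card S F (S+1) F (by omega) le_rfl hfit) hnot' hres
      · rw [dif_neg hs']
        rw [hres]
        unfold totalF
        conv_rhs => rw [(by omega : N + 1 = (F+1) + 1), Finset.sum_range_succ]
        rw [cntEnd_zero arr card N (F+1) (fun x hx => hnot' x (by omega))]
        simp

lemma foldl_tally_chars (cs : List Char) :
    cs.foldl (fun acc ch => bumpStep acc (char2num ch)) (some (List.replicate 27 (0:Int)))
      = (cs.map char2num).foldl bumpStep (some (List.replicate 27 (0:Int))) :=
  List.foldl_map.symm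

lemma main_theorem : ∀ (m c : String) (n : Int), Pre_count_subwords m c n →
    count_subwords m c n = count_subwords_alt m c n := by
  intro m c n hpre
  by_cases heq : m = c
  · unfold count_subwords count_subwords_alt
    rw [if_pos (beq_iff_eq.mpr heq), if_pos (beq_iff_eq.mpr heq)]
  · obtain ⟨hm, hc, hdisj⟩ := hpre.resolve_left heq
    have hbm : ∀ x ∈ m.toList.map char2num, -27 ≤ x ∧ x ≤ 26 := by
      intro x hx
      obtain ⟨ch, hch, rfl⟩ := List.mem_map.mp hx
      have := hm ch hch
      unfold char2num
      omega
    have hbc : ∀ x ∈ c.toList.map char2num, -27 ≤ x ∧ x ≤ 26 := by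
      intro x hx
      obtain ⟨ch, hch, rfl⟩ := List.mem_map.mp hx
      have := hc ch hch
      unfold char2num
      omega
    have hbeq : (m == c) = false := beq_eq_false_iff_ne.mpr heq
    unfold count_subwords count_subwords_alt
    rw [hbeq]
    simp only [Bool.false_eq_true, if_false]
    rw [tallyB_eq, foldl_tally_chars c.toList]
    simp only [buildCounterA_eq (m.toList.map char2num) hbm,
      buildCounterA_eq (c.toList.map char2num) hbc,
      rawBuild_eq (m.toList.map char2num) hbm,
      rawBuild_eq (c.toList.map char2num) hbc]
    by_cases hEq26 : ∀ i < 26, cntSlot (m.toList.map char2num) i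
        = cntSlot (c.toList.map char2num) i
    · rw [if_pos ((countersEqA_iff _ _).mpr hEq26),
        if_pos ((sliceEqB_iff _ _).mpr hEq26)]
    · rw [if_neg (fun h => hEq26 ((countersEqA_iff _ _).mp h)),
        if_neg (fun h => hEq26 ((sliceEqB_iff _ _).mp h))]
      obtain ⟨hne, hlen⟩ := hdisj.resolve_left hEq26
      have hmnil : m.toList ≠ [] := fun h => hne (String.toList_eq_nil_iff.mp h)
      have hlen0 : 0 < (m.toList.map char2num).length := by
        simp only [List.length_map]
        exact List.length_pos_iff.mpr hmnil
      have hget : PySem.List.pyGet? (m.toList.map char2num) 0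
          = some ((m.toList.map char2num)[0]) := by
        rw [(by norm_num : (0:Int) = ((0:Nat):Int)), PySem.List.pyGet?_natCast,
          List.getElem?_eq_getElem hlen0]
      simp only [hget]
      by_cases hn0 : 0 < n
      · -- the real loops
        have hn : n = ((n.toNat : Nat) : Int) := by omega
        have hNlen : n.toNat ≤ (m.toList.map char2num).length := by
          simp only [List.length_map]
          omega
        have hN0 : 0 < n.toNat := by omega
        have hres0A : (0:Int) = ((∑ y ∈ Finset.range (0+1),
            cntEndF (m.toList.map char2num) (c.toList.map char2num) n.toNat y : Nat) : Int) := by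
          rw [Finset.sum_range_one,
            cntEnd_zero _ _ _ 0 (fun x hx => absurd hx (Nat.not_lt_zero x))]
          rfl
        have hA := loopA_go (m.toList.map char2num) (c.toList.map char2num) n n.toNat hn
          hNlen hbm (2 * n.toNat + 1) 0 0 0 (by omega) le_rfl hN0
          (fits_nil _ _ _ _ le_rfl) (fun x hx => absurd hx (Nat.not_lt_zero x)) hres0A
        have hB := outerB_go (m.toList.map char2num) (c.toList.map char2num) n n.toNat hn
          hNlen hbm (n.toNat + 1) 0 0 0 (by omega) (Nat.zero_le _) (Nat.zero_le _)
          (fits_nil _ _ _ _ le_rfl) (by rw [Finset.sum_range_zero]; rfl)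
        have hbuff : wnd (m.toList.map char2num) 0 (0+1) = [(m.toList.map char2num)[0]] := by
          rw [wnd_succ _ 0 0 le_rfl hlen0, wnd_nil _ 0 0 le_rfl]
          rfl
        have hct : (tbl fun k => (cntSlot (c.toList.map char2num) k : Int))
            = tbl (fun k => (cntSlot (c.toList.map char2num) k : Int)
                - (cntSlot (wnd (m.toList.map char2num) 0 0) k : Int)) := by
          apply tbl_congr
          intro k hk
          rw [wnd_nil _ 0 0 le_rfl, cntSlot_nil]
          push_cast
          ring
        rw [hbuff, ← hct] at hA
        have hwin0 : List.replicate 27 (0:Int)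
            = tbl (fun k => (cntSlot (wnd (m.toList.map char2num) 0 0) k : Int)) := by
          rw [replicate_tbl]
          apply tbl_congr
          intro k hk
          rw [wnd_nil _ 0 0 le_rfl, cntSlot_nil]
          rfl
        rw [← hwin0] at hB
        simp only [Nat.cast_zero] at hA hB
        rw [hA, hB]
      · -- n_main ≤ 0: both loops exit immediately
        rw [loopA.eq_def, dif_neg (by omega : ¬ ((0:Int) < n)),
          outerB, dif_neg (by omega : ¬ ((0:Int) < n))]

-- ===== VERDICT (by name: the statement is the Claim_ definition above) =====
theorem count_subwords_spec : Claim_equal_count_subwords := by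
  intro m c n _ hpre
  exact main_theorem m c n hpre
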